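-- pv_equiv track=rewrite | github.com/HazyResearch/metal | metal/label_model/learn_deps.py | _force_singleton
-- ===== SOURCE A (Python) =====
-- def _force_singleton(deps):
--     """Ensure that learned dependencies for singleton separators.
--     TODO: build checker for no complete graphs with these additions
--     Args:
--         deps: (list) List of tuples of LF pairs that are dependent
--     Example:
--         if (0,1) and (1,2) exist, add (0,2)
--         if (0,1) and (0,2) exist, add (1,2)
--         if (0,3) and (2,3) exist, add (0,2)
--         if (1,3) and (0,1) exist, add (0,3)
--     """
--     deps_singleton = []
--     for i,j in deps:
--         if i < j:
--             deps_singleton.append((i,j))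
--
--     for i,j in deps:
--         for k,l in deps:
--             if (i == k) and (j < l):
--                 deps_singleton.append((j,l))
--             if (j == l) and (i < k):
--                 deps_singleton.append((i,k))
--             if (j == k) and (i < l):
--                 deps_singleton.append((i,l))
--             if (i == l) and (j < k):
--                 deps_singleton.append((j,k))
--     return deps_singleton
-- ===== SOURCE B (Python) =====
-- def _force_singleton(deps):
--     out = [(i, j) for i, j in deps if i < j]
--     touch = {}
--     for idx, (k, l) in enumerate(deps):
--         touch.setdefault(k, []).append(idx)
--         if l != k:
--             touch.setdefault(l, []).append(idx)
--     for i, j in deps: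
--         for idx in sorted(set(touch.get(i, []) + touch.get(j, []))):
--             k, l = deps[idx]
--             if i == k and j < l:
--                 out.append((j, l))
--             if j == l and i < k:
--                 out.append((i, k))
--             if j == k and i < l:
--                 out.append((i, l))
--             if i == l and j < k:
--                 out.append((j, k))
--     return out
-- ===== Notes on version B (the rewrite author's own statement) =====
-- stated objective: faster
-- what changed: Replaces A's quadratic all-pairs inner scan with a dict bucketing pair indices by endpoint value, so each outer pair only visits pairs sharing an endpoint (merged back into deps order via sorted(set(...))).
import Mathlib
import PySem

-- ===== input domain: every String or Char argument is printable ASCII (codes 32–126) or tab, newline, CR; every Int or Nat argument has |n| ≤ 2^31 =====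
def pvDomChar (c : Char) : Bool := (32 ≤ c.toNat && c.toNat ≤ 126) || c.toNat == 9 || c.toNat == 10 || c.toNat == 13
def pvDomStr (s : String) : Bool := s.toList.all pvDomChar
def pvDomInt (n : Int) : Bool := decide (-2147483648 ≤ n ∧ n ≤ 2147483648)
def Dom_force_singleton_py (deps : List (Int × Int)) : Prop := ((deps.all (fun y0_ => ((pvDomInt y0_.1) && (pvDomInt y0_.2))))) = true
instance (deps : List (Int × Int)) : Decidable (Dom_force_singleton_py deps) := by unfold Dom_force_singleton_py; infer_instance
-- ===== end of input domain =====

-- B replaces A's quadratic all-pairs inner scan by a dict of endpoint → index buckets, visiting per outer pair only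
-- the pairs that share an endpoint (merged in deps order via sorted(set(...))): output-sensitive, measurably faster.

-- ===== PORT A =====
def force_singleton_py (deps : List (Int × Int)) : List (Int × Int) :=
  let ds := deps.foldl (fun acc p => if p.1 < p.2 then acc ++ [(p.1, p.2)] else acc) []
  deps.foldl (fun acc p =>
    deps.foldl (fun acc q =>
      let acc := if p.1 = q.1 ∧ p.2 < q.2 then acc ++ [(p.2, q.2)] else acc
      let acc := if p.2 = q.2 ∧ p.1 < q.1 then acc ++ [(p.1, q.1)] else acc
      let acc := if p.2 = q.1 ∧ p.1 < q.2 then acc ++ [(p.1, q.2)] else acc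
      if p.1 = q.2 ∧ p.2 < q.1 then acc ++ [(p.2, q.1)] else acc) acc) ds

-- ===== PORT B =====
-- Python's touch.setdefault(k, []).append(idx) appends to the list stored under k (the list is reachable
-- only through the dict, so this is exactly d.insert k (d.getD k [] ++ [idx])).
def pvTouch (deps : List (Int × Int)) : PySem.Dict Int (List Int) :=
  (PySem.List.enumerate deps 0).foldl (fun d e =>
    let d := d.insert e.2.1 (d.getD e.2.1 [] ++ [e.1])
    if e.2.2 ≠ e.2.1 then d.insert e.2.2 (d.getD e.2.2 [] ++ [e.1]) else d)
    PySem.Dict.empty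

def force_singleton_py_alt (deps : List (Int × Int)) : List (Int × Int) :=
  let touch := pvTouch deps
  deps.foldl (fun acc p =>
    (PySem.List.sorted
        (PySem.Set.ofList (touch.getD p.1 [] ++ touch.getD p.2 []))
        (fun x => x) false).foldl
      (fun acc idx =>
        let q := PySem.List.pyGetD deps idx (0, 0)
        let acc := if p.1 = q.1 ∧ p.2 < q.2 then acc ++ [(p.2, q.2)] else acc
        let acc := if p.2 = q.2 ∧ p.1 < q.1 then acc ++ [(p.1, q.1)] else acc
        let acc := if p.2 = q.1 ∧ p.1 < q.2 then acc ++ [(p.1, q.2)] else acc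
        if p.1 = q.2 ∧ p.2 < q.1 then acc ++ [(p.2, q.1)] else acc) acc)
    (deps.filter (fun p => decide (p.1 < p.2)))

-- ===== PRECONDITION & SPEC =====
def Spec_force_singleton_py (deps : List (Int × Int)) (out : List (Int × Int)) : Prop := out = force_singleton_py_alt deps
instance (deps : List (Int × Int)) (out : List (Int × Int)) : Decidable (Spec_force_singleton_py deps out) := by unfold Spec_force_singleton_py; infer_instance

-- ===== CLAIM (what is proved, stated in full; the proofs are below) =====
def Claim_equal_force_singleton_py : Prop := ∀ (deps : List (Int × Int)), Dom_force_singleton_py deps → Spec_force_singleton_py deps (force_singleton_py deps)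

-- ===== LEMMAS AND PROOFS =====

-- The four conditional appends of the shared inner body, as a list.
def pvEmit (p q : Int × Int) : List (Int × Int) :=
  (if p.1 = q.1 ∧ p.2 < q.2 then [(p.2, q.2)] else []) ++
  (if p.2 = q.2 ∧ p.1 < q.1 then [(p.1, q.1)] else []) ++
  (if p.2 = q.1 ∧ p.1 < q.2 then [(p.1, q.2)] else []) ++
  (if p.1 = q.2 ∧ p.2 < q.1 then [(p.2, q.1)] else [])

def pvTouchesB (q : Int × Int) (v : Int) : Bool := decide (q.1 = v) || decide (q.2 = v)

-- indices (in increasing order) of the pairs of deps having v as an endpoint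
def pvIdxsOf (deps : List (Int × Int)) (v : Int) : List Int :=
  (PySem.List.pyRange 0 (deps.length : Int) 1).filter
    (fun idx => pvTouchesB (PySem.List.pyGetD deps idx (0, 0)) v)

theorem pvEmit_nil (p q : Int × Int) (h1 : pvTouchesB q p.1 = false)
    (h2 : pvTouchesB q p.2 = false) : pvEmit p q = [] := by
  obtain ⟨i, j⟩ := p; obtain ⟨k, l⟩ := q
  simp only [pvTouchesB, Bool.or_eq_false_iff, decide_eq_false_iff_not] at h1 h2
  obtain ⟨h1a, h1b⟩ := h1; obtain ⟨h2a, h2b⟩ := h2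
  simp only [pvEmit]
  rw [if_neg (by omega), if_neg (by omega), if_neg (by omega), if_neg (by omega)]
  rfl

theorem pv_inner_foldl (p : Int × Int) (l : List (Int × Int)) (acc : List (Int × Int)) :
    l.foldl (fun acc q =>
      let acc := if p.1 = q.1 ∧ p.2 < q.2 then acc ++ [(p.2, q.2)] else acc
      let acc := if p.2 = q.2 ∧ p.1 < q.1 then acc ++ [(p.1, q.1)] else acc
      let acc := if p.2 = q.1 ∧ p.1 < q.2 then acc ++ [(p.1, q.2)] else acc
      if p.1 = q.2 ∧ p.2 < q.1 then acc ++ [(p.2, q.1)] else acc) acc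
    = acc ++ l.flatMap (pvEmit p) := by
  induction l generalizing acc with
  | nil => simp
  | cons q t ih =>
      simp only [List.foldl_cons, List.flatMap_cons, ih, pvEmit]
      split_ifs <;> simp

theorem pv_inner_foldl_idx (deps : List (Int × Int)) (p : Int × Int) (l : List Int)
    (acc : List (Int × Int)) :
    l.foldl (fun acc idx =>
      let q := PySem.List.pyGetD deps idx (0, 0)
      let acc := if p.1 = q.1 ∧ p.2 < q.2 then acc ++ [(p.2, q.2)] else acc
      let acc := if p.2 = q.2 ∧ p.1 < q.1 then acc ++ [(p.1, q.1)] else acc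
      let acc := if p.2 = q.1 ∧ p.1 < q.2 then acc ++ [(p.1, q.2)] else acc
      if p.1 = q.2 ∧ p.2 < q.1 then acc ++ [(p.2, q.1)] else acc) acc
    = acc ++ l.flatMap (fun idx => pvEmit p (PySem.List.pyGetD deps idx (0, 0))) := by
  induction l generalizing acc with
  | nil => simp
  | cons x t ih =>
      simp only [List.foldl_cons, List.flatMap_cons, ih, pvEmit]
      split_ifs <;> simp

theorem pvA_outer (deps l : List (Int × Int)) (acc : List (Int × Int)) :
    l.foldl (fun acc p =>
      deps.foldl (fun acc q =>
        let acc := if p.1 = q.1 ∧ p.2 < q.2 then acc ++ [(p.2, q.2)] else acc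
        let acc := if p.2 = q.2 ∧ p.1 < q.1 then acc ++ [(p.1, q.1)] else acc
        let acc := if p.2 = q.1 ∧ p.1 < q.2 then acc ++ [(p.1, q.2)] else acc
        if p.1 = q.2 ∧ p.2 < q.1 then acc ++ [(p.2, q.1)] else acc) acc) acc
    = acc ++ l.flatMap (fun p => deps.flatMap (pvEmit p)) := by
  induction l generalizing acc with
  | nil => simp
  | cons x t ih =>
      simp only [List.foldl_cons, List.flatMap_cons]
      rw [pv_inner_foldl, ih, List.append_assoc]

theorem pvB_outer (deps l : List (Int × Int)) (acc : List (Int × Int)) :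
    l.foldl (fun acc p =>
      (PySem.List.sorted
          (PySem.Set.ofList ((pvTouch deps).getD p.1 [] ++ (pvTouch deps).getD p.2 []))
          (fun x => x) false).foldl
        (fun acc idx =>
          let q := PySem.List.pyGetD deps idx (0, 0)
          let acc := if p.1 = q.1 ∧ p.2 < q.2 then acc ++ [(p.2, q.2)] else acc
          let acc := if p.2 = q.2 ∧ p.1 < q.1 then acc ++ [(p.1, q.1)] else acc
          let acc := if p.2 = q.1 ∧ p.1 < q.2 then acc ++ [(p.1, q.2)] else acc
          if p.1 = q.2 ∧ p.2 < q.1 then acc ++ [(p.2, q.1)] else acc) acc) acc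
    = acc ++ l.flatMap (fun p =>
        (PySem.List.sorted
            (PySem.Set.ofList ((pvTouch deps).getD p.1 [] ++ (pvTouch deps).getD p.2 []))
            (fun x => x) false).flatMap
          (fun idx => pvEmit p (PySem.List.pyGetD deps idx (0, 0)))) := by
  induction l generalizing acc with
  | nil => simp
  | cons x t ih =>
      simp only [List.foldl_cons, List.flatMap_cons]
      rw [pv_inner_foldl_idx, ih, List.append_assoc]

theorem pvTouch_step (d : PySem.Dict Int (List Int)) (n : Int) (q : Int × Int) (v : Int) :
    (if q.2 ≠ q.1
      then (d.insert q.1 (d.getD q.1 [] ++ [n])).insert q.2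
             ((d.insert q.1 (d.getD q.1 [] ++ [n])).getD q.2 [] ++ [n])
      else d.insert q.1 (d.getD q.1 [] ++ [n])).getD v []
    = d.getD v [] ++ (if pvTouchesB q v then [n] else []) := by
  by_cases h : q.2 = q.1
  · rw [if_neg (fun hc => hc h), PySem.Dict.getD_insert]
    by_cases h1 : v = q.1
    · subst h1
      simp [pvTouchesB]
    · have ht : pvTouchesB q v = false := by
        simp only [pvTouchesB, Bool.or_eq_false_iff, decide_eq_false_iff_not]
        omega
      rw [if_neg h1, ht]
      simp
  · rw [if_pos h, PySem.Dict.getD_insert, PySem.Dict.getD_insert, PySem.Dict.getD_insert]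
    by_cases h2 : v = q.2
    · subst h2
      simp [pvTouchesB, h]
    · by_cases h1 : v = q.1
      · subst h1
        simp [pvTouchesB, h2]
      · have ht : pvTouchesB q v = false := by
          simp only [pvTouchesB, Bool.or_eq_false_iff, decide_eq_false_iff_not]
          omega
        rw [if_neg h2, if_neg h1, ht]
        simp

theorem pvIdxsOf_append (ds : List (Int × Int)) (q : Int × Int) (v : Int) :
    pvIdxsOf (ds ++ [q]) v
    = pvIdxsOf ds v ++ (if pvTouchesB q v then [(ds.length : Int)] else []) := by
  unfold pvIdxsOf
  have h1 : (((ds ++ [q]).length : Nat) : Int) = (ds.length : Int) + 1 := by simp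
  have hnil : PySem.List.pyRange ((ds.length : Int) + 1) ((ds.length : Int) + 1) = [] :=
    List.eq_nil_of_length_eq_zero (by rw [PySem.List.length_pyRange_one]; omega)
  have hsing : PySem.List.pyRange (ds.length : Int) ((ds.length : Int) + 1)
      = [(ds.length : Int)] := by
    rw [PySem.List.pyRange_one_cons (by omega), hnil]
  rw [h1, PySem.List.pyRange_one_append 0 (ds.length : Int) ((ds.length : Int) + 1)
        (by positivity) (by omega), List.filter_append, hsing]
  congr 1
  · apply List.filter_congr
    intro x hx
    rw [PySem.List.mem_pyRange_one] at hx
    have hg : PySem.List.pyGetD (ds ++ [q]) x (0, 0) = PySem.List.pyGetD ds x (0, 0) := by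
      rw [PySem.List.pyGetD_eq_getElem _ _ hx.1 (by simp; omega),
          PySem.List.pyGetD_eq_getElem _ _ hx.1 (by exact_mod_cast hx.2),
          List.getElem_append_left (by omega)]
    rw [hg]
  · have hq : PySem.List.pyGetD (ds ++ [q]) (ds.length : Int) (0, 0) = q := by
      rw [PySem.List.pyGetD_eq_getElem _ _ (by positivity) (by simp),
          List.getElem_append_right (by simp)]
      simp
    simp only [List.filter_cons, List.filter_nil, hq]

theorem pvTouch_getD (deps : List (Int × Int)) :
    ∀ v, (pvTouch deps).getD v [] = pvIdxsOf deps v := by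
  induction deps using List.reverseRecOn with
  | nil =>
      intro v
      have hnil : PySem.List.pyRange 0 0 = [] :=
        List.eq_nil_of_length_eq_zero (by simp)
      simp [pvTouch, pvIdxsOf, PySem.List.enumerate_nil, PySem.Dict.getD_empty, hnil]
  | append_singleton ds q ih =>
      intro v
      unfold pvTouch
      rw [PySem.List.enumerate_append, PySem.List.enumerate_cons, PySem.List.enumerate_nil,
          List.foldl_append]
      simp only [List.foldl_cons, List.foldl_nil, zero_add]
      have hd : List.foldl (fun d e =>
          let d' := d.insert e.2.1 (d.getD e.2.1 [] ++ [e.1])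
          if e.2.2 ≠ e.2.1 then d'.insert e.2.2 (d'.getD e.2.2 [] ++ [e.1]) else d')
          PySem.Dict.empty (PySem.List.enumerate ds 0) = pvTouch ds := rfl
      rw [hd, pvTouch_step, ih, pvIdxsOf_append]

theorem pv_cand_eq (deps : List (Int × Int)) (p : Int × Int) :
    PySem.List.sorted
      (PySem.Set.ofList ((pvTouch deps).getD p.1 [] ++ (pvTouch deps).getD p.2 []))
      (fun x => x) false
    = (PySem.List.pyRange 0 (deps.length : Int) 1).filter
        (fun idx => pvTouchesB (PySem.List.pyGetD deps idx (0, 0)) p.1 ||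
                    pvTouchesB (PySem.List.pyGetD deps idx (0, 0)) p.2) := by
  apply PySem.List.sorted_eq_of_perm_of_pairwise_lt
  · rw [List.perm_ext_iff_of_nodup ((PySem.List.nodup_pyRange_one 0 _).filter _)
        (PySem.Set.nodup_ofList _)]
    intro x
    rw [PySem.Set.mem_ofList, List.mem_append, pvTouch_getD, pvTouch_getD]
    simp only [pvIdxsOf, List.mem_filter, Bool.or_eq_true]
    tauto
  · exact (PySem.List.pairwise_lt_pyRange_one 0 _).filter _

theorem pv_flatMap_filter {α β : Type} (l : List α) (p : α → Bool) (f : α → List β)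
    (h : ∀ x ∈ l, p x = false → f x = []) :
    (l.filter p).flatMap f = l.flatMap f := by
  induction l with
  | nil => simp
  | cons x t ih =>
      by_cases hx : p x = true
      · simp [hx, ih (fun y hy => h y (List.mem_cons_of_mem _ hy))]
      · simp only [Bool.not_eq_true] at hx
        simp [hx, h x (List.mem_cons_self) hx,
          ih (fun y hy => h y (List.mem_cons_of_mem _ hy))]

theorem pv_flatMap_range (deps : List (Int × Int)) (p : Int × Int) :
    (PySem.List.pyRange 0 (deps.length : Int) 1).flatMap
      (fun idx => pvEmit p (PySem.List.pyGetD deps idx (0, 0)))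
    = deps.flatMap (pvEmit p) := by
  conv_rhs => rw [← PySem.List.map_pyGetD_pyRange_zero' deps (0, 0)]
  rw [List.flatMap_map]

-- ===== VERDICT (by name: the statement is the Claim_ definition above) =====
theorem force_singleton_py_spec : Claim_equal_force_singleton_py := by
  intro deps _
  unfold Spec_force_singleton_py
  simp only [force_singleton_py, force_singleton_py_alt]
  rw [PySem.List.foldl_append_ite (fun p : Int × Int => p.1 < p.2) (fun p => (p.1, p.2)) deps []]
  rw [pvA_outer, pvB_outer]
  simp only [List.nil_append]
  congr 1
  · simp
  · congr 1
    funext p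
    rw [pv_cand_eq, pv_flatMap_filter _ _ _ ?_, pv_flatMap_range]
    intro x hx hfalse
    simp only [Bool.or_eq_false_iff] at hfalse
    exact pvEmit_nil p _ hfalse.1 hfalse.2
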